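-- pv_equiv track=rewrite | github.com/natedoge123/nand2tetris | 10/jack_comp/myToken.py | normal_token
-- ===== SOURCE A (Python) =====
-- def normal_token(s):
--     token_items = []
--     word = ''
--     for char in s:
--         if char.isalpha():
--             word += char
--         else:
--             if word:
--                 token_items.append(word)
--                 word = ''
--             if char != ' ':
--                 token_items.append(char)
--     if word:
--         token_items.append(word)
--
--     return token_items
-- ===== SOURCE B (Python) =====
-- from itertools import groupby
--
-- def normal_token(s):
--     token_items = []
--     for is_word, grp in groupby(s, key=str.isalpha):
--         if is_word:
--             token_items.append(''.join(grp))
--         else: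
--             token_items.extend(ch for ch in grp if ch != ' ')
--     return token_items
-- ===== Notes on version B (the rewrite author's own statement) =====
-- stated objective: idiomatic
-- what changed: Replaces the char-by-char accumulator loop with itertools.groupby on str.isalpha: maximal letter runs become word tokens in one step, non-letter runs are filtered of spaces.
import Mathlib
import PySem

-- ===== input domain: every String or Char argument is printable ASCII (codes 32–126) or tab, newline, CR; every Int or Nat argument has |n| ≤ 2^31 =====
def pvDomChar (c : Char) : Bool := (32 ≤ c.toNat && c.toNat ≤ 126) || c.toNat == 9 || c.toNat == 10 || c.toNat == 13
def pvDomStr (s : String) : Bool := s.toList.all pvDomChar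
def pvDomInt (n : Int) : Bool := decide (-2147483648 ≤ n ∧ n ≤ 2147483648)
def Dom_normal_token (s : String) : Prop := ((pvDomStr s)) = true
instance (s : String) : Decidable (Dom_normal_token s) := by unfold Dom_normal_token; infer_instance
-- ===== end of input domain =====

-- B tokenizes via maximal same-class runs (groupby on isalpha) instead of A's char-by-char word accumulator; return values are proved equal for every string.

-- ===== PORT A =====
-- one step of A's for-loop over the state (token_items, word)
def normalStep (st : List String × List Char) (c : Char) : List String × List Char :=
  if PySem.Chars.isalpha c then (st.1, st.2 ++ [c])
  else
    let st1 := if st.2 ≠ [] then (st.1 ++ [String.ofList st.2], ([] : List Char)) else st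
    if c ≠ ' ' then (st1.1 ++ [String.ofList [c]], st1.2) else st1

def normal_token (s : String) : List String :=
  let st := s.toList.foldl normalStep ([], [])
  if st.2 ≠ [] then st.1 ++ [String.ofList st.2] else st.1

-- ===== PORT B =====
-- groupby(s, key=str.isalpha): an alpha run is joined into one word token,
-- a non-alpha run contributes its non-space characters one by one
def altGo (cs : List Char) : List String :=
  match cs with
  | [] => []
  | c :: rest =>
    if PySem.Chars.isalpha c then
      String.ofList (c :: rest.takeWhile PySem.Chars.isalpha)
        :: altGo (rest.dropWhile PySem.Chars.isalpha)
    else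
      (if c = ' ' then [] else [String.ofList [c]]) ++ altGo rest
termination_by cs.length
decreasing_by
  · have := List.length_dropWhile_le (p := PySem.Chars.isalpha) rest
    simp only [List.length_cons]; omega
  · simp only [List.length_cons]; omega

def normal_token_alt (s : String) : List String := altGo s.toList

-- ===== PRECONDITION & SPEC =====
def Spec_normal_token (s : String) (out : List String) : Prop := out = normal_token_alt s
instance (s : String) (out : List String) : Decidable (Spec_normal_token s out) := by unfold Spec_normal_token; infer_instance

-- ===== CLAIM (what is proved, stated in full; the proofs are below) =====
def Claim_equal_normal_token : Prop := ∀ (s : String), Dom_normal_token s → Spec_normal_token s (normal_token s)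

-- ===== LEMMAS AND PROOFS =====

-- reference tokenizer: word accumulator w, remaining input cs
def tok (w : List Char) (cs : List Char) : List String :=
  match cs with
  | [] => if w = [] then [] else [String.ofList w]
  | c :: rest =>
    if PySem.Chars.isalpha c then tok (w ++ [c]) rest
    else (if w = [] then [] else [String.ofList w])
         ++ (if c = ' ' then [] else [String.ofList [c]]) ++ tok [] rest

lemma a_eq_tok (cs : List Char) : ∀ (acc : List String) (w : List Char),
    (let st := cs.foldl normalStep (acc, w)
     if st.2 ≠ [] then st.1 ++ [String.ofList st.2] else st.1) = acc ++ tok w cs := by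
  induction cs with
  | nil =>
    intro acc w
    by_cases hw : w = [] <;> simp [tok, hw]
  | cons c rest ih =>
    intro acc w
    simp only [List.foldl_cons, tok]
    by_cases hα : PySem.Chars.isalpha c
    · simpa [normalStep, hα] using ih acc (w ++ [c])
    · by_cases hw : w = [] <;> by_cases hc : c = ' ' <;>
        simp [normalStep, hα, hw, hc, ih, List.append_assoc,
          (by decide : PySem.Chars.isalpha ' ' = false)]

lemma tok_run (cs : List Char) : ∀ (w : List Char), w ≠ [] →
    tok w cs = String.ofList (w ++ cs.takeWhile PySem.Chars.isalpha)
               :: tok [] (cs.dropWhile PySem.Chars.isalpha) := by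
  induction cs with
  | nil => intro w hw; simp [tok, hw]
  | cons c rest ih =>
    intro w hw
    by_cases hα : PySem.Chars.isalpha c
    · simp only [tok, hα, if_pos]
      rw [ih (w ++ [c]) (by simp)]
      simp [hα]
    · simp [tok, hα, hw]

lemma b_eq_tok (cs : List Char) : altGo cs = tok [] cs := by
  match cs with
  | [] => simp [altGo, tok]
  | c :: rest =>
    rw [altGo]
    by_cases hα : PySem.Chars.isalpha c
    · rw [if_pos hα, b_eq_tok (rest.dropWhile PySem.Chars.isalpha)]
      have h := tok_run rest [c] (by simp)
      simp only [List.cons_append, List.nil_append] at h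
      simp only [tok, hα, if_pos]
      exact h.symm ▸ rfl
    · rw [if_neg hα, b_eq_tok rest]
      simp [tok, hα]
termination_by cs.length
decreasing_by
  · have := List.length_dropWhile_le (p := PySem.Chars.isalpha) rest
    simp only [List.length_cons]; omega
  · simp

-- ===== VERDICT (by name: the statement is the Claim_ definition above) =====
theorem normal_token_spec : Claim_equal_normal_token := by
  intro s _
  show normal_token s = normal_token_alt s
  rw [normal_token_alt, b_eq_tok]
  have h := a_eq_tok s.toList [] []
  simp only [List.nil_append] at h
  rw [normal_token]
  exact h
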